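-- pv_equiv track=rewrite | github.com/JAB1305/BWInf2020 | woerter_sortieren_sebastian.py | newWord
-- ===== SOURCE A (Python) =====
-- def newWord(wert, text, new):
--     # Jedes Zeichen des Strings "wert" muss entweder ein "-" sein, oder dem Buchstaben des Strings "text" entsprechen
--     for i in range(len(text)):
--         if wert[i] == text[i] or wert[i] == "_":
--             new = new + text[
--                 i]  # ist dies der Fall, wird dem String "new" der Buchstabe an i. Stelle des Strings "text" hinzugefügt
--         else:
--             new = ""
--     return new
-- ===== SOURCE B (Python) =====
-- def newWord(wert, text, new):
--     # Reverse scan: only characters after the last mismatch survive A's resets.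
--     suffix = ""
--     for i in range(len(text) - 1, -1, -1):
--         if wert[i] == text[i] or wert[i] == "_":
--             suffix = text[i] + suffix
--         else:
--             return suffix
--     return new + suffix
-- ===== Notes on version B (the rewrite author's own statement) =====
-- stated objective: alternative
-- what changed: Replaces the forward build-and-reset loop by a reverse scan that accumulates the matched suffix and returns it at the first mismatch, exploiting that only characters after the last reset survive.
import Mathlib
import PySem

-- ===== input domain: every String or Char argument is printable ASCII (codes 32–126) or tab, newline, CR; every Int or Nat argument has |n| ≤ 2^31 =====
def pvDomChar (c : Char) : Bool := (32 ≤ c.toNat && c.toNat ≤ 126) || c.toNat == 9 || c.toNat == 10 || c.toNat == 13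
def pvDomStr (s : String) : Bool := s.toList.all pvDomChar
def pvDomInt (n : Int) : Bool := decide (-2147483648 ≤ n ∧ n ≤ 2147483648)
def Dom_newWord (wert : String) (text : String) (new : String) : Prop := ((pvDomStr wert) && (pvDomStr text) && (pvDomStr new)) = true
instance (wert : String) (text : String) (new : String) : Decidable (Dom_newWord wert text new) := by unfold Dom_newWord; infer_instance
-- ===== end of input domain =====

-- B replaces A's forward build-and-reset loop by a reverse scan returning the suffix at the
-- first mismatch (objective: alternative, same cost). Equal return value proved on Pre_.

-- ===== PORT A =====
-- A's forward loop: for i in range(len(text)), append text[i] on match, reset new to "" otherwise.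
def newWordA_go (wert text : List Char) (new : List Char) (i : Nat) : List Char :=
  if h : i < text.length then
    match PySem.List.pyGet? wert (i : Int), PySem.List.pyGet? text (i : Int) with
    | some wc, some tc =>
        if wc = tc ∨ wc = '_' then newWordA_go wert text (new ++ [tc]) (i + 1)
        else newWordA_go wert text [] (i + 1)
    | _, _ => new   -- IndexError in Python; excluded by Pre_
  else new
termination_by text.length - i

def newWord (wert : String) (text : String) (new : String) : String :=
  String.mk (newWordA_go wert.toList text.toList new.toList 0)

-- ===== PORT B =====
-- B's reverse loop: counter k = current index + 1, suffix accumulated from the back;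
-- returns the suffix at the first mismatch, new ++ suffix if the loop completes.
def newWordB_go (wert text : List Char) (new : List Char) : Nat → List Char → List Char
  | 0, suffix => new ++ suffix
  | k + 1, suffix =>
    match PySem.List.pyGet? wert (k : Int), PySem.List.pyGet? text (k : Int) with
    | some wc, some tc =>
        if wc = tc ∨ wc = '_' then newWordB_go wert text new k (tc :: suffix)
        else suffix
    | _, _ => suffix   -- IndexError in Python; excluded by Pre_

def newWord_alt (wert : String) (text : String) (new : String) : String :=
  String.mk (newWordB_go wert.toList text.toList new.toList text.toList.length [])

-- ===== PRECONDITION & SPEC =====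
-- Both Pythons raise IndexError iff len(text) > len(wert); Pre_ excludes exactly those inputs.
def Pre_newWord (wert : String) (text : String) (new : String) : Prop :=
  text.toList.length ≤ wert.toList.length
instance (wert : String) (text : String) (new : String) : Decidable (Pre_newWord wert text new) := by
  unfold Pre_newWord; infer_instance

def pvWitness_newWord : String × String × String := ("a_c", "abc", "x")

def Spec_newWord (wert : String) (text : String) (new : String) (out : String) : Prop := out = newWord_alt wert text new
instance (wert : String) (text : String) (new : String) (out : String) : Decidable (Spec_newWord wert text new out) := by unfold Spec_newWord; infer_instance

-- ===== CLAIM (what is proved, stated in full; the proofs are below) =====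
def Claim_equal_newWord : Prop := ∀ (wert : String) (text : String) (new : String), Dom_newWord wert text new → Pre_newWord wert text new → Spec_newWord wert text new (newWord wert text new)

-- ===== LEMMAS AND PROOFS =====

-- Common reference function: run the loop over indices i+d-1 down to i; base returns new ++ text.drop i.
def pvH (wert text new : List Char) (i : Nat) : Nat → List Char
  | 0 => new ++ text.drop i
  | d + 1 =>
    match PySem.List.pyGet? wert ((i + d : Nat) : Int), PySem.List.pyGet? text ((i + d : Nat) : Int) with
    | some wc, some tc =>
        if wc = tc ∨ wc = '_' then pvH wert text new i d
        else text.drop (i + d + 1)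
    | _, _ => text.drop (i + d + 1)

theorem pvH_shift_match (wert text new new' : List Char) (i : Nat)
    (wc tc : Char) (hw : PySem.List.pyGet? wert (i : Int) = some wc)
    (ht : PySem.List.pyGet? text (i : Int) = some tc) (hm : wc = tc ∨ wc = '_')
    (hnew : new' ++ text.drop (i + 1) = new ++ text.drop i) :
    ∀ d, pvH wert text new' (i + 1) d = pvH wert text new i (d + 1) := by
  intro d
  induction d with
  | zero => simp [pvH, hw, ht, hm, hnew]
  | succ d ih =>
      have harg : (i + 1) + d = i + (d + 1) := by omega
      simp only [pvH, harg]
      cases hw' : PySem.List.pyGet? wert ((i + (d + 1) : Nat) : Int) with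
      | none => rfl
      | some wc' =>
          cases ht' : PySem.List.pyGet? text ((i + (d + 1) : Nat) : Int) with
          | none => rfl
          | some tc' =>
              by_cases hc : wc' = tc' ∨ wc' = '_'
              · dsimp only
                rw [if_pos hc, if_pos hc, ih]
                simp only [pvH]
              · dsimp only
                rw [if_neg hc, if_neg hc]

theorem pvH_shift_mismatch (wert text new : List Char) (i : Nat)
    (wc tc : Char) (hw : PySem.List.pyGet? wert (i : Int) = some wc)
    (ht : PySem.List.pyGet? text (i : Int) = some tc) (hm : ¬ (wc = tc ∨ wc = '_')) :
    ∀ d, pvH wert text [] (i + 1) d = pvH wert text new i (d + 1) := by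
  intro d
  induction d with
  | zero => simp [pvH, hw, ht, hm]
  | succ d ih =>
      have harg : (i + 1) + d = i + (d + 1) := by omega
      simp only [pvH, harg]
      cases hw' : PySem.List.pyGet? wert ((i + (d + 1) : Nat) : Int) with
      | none => rfl
      | some wc' =>
          cases ht' : PySem.List.pyGet? text ((i + (d + 1) : Nat) : Int) with
          | none => rfl
          | some tc' =>
              by_cases hc : wc' = tc' ∨ wc' = '_'
              · dsimp only
                rw [if_pos hc, if_pos hc, ih]
                simp only [pvH]
              · dsimp only
                rw [if_neg hc, if_neg hc]

theorem pyGet?_some_of_lt {l : List Char} {j : Nat} (h : j < l.length) :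
    PySem.List.pyGet? l (j : Int) = some l[j] := by
  simp [PySem.List.pyGet?_natCast, List.getElem?_eq_getElem h]

theorem A_eq_pvH (wert text : List Char) (hlen : text.length ≤ wert.length) :
    ∀ (d i : Nat) (new : List Char), i + d = text.length →
      newWordA_go wert text new i = pvH wert text new i d := by
  intro d
  induction d with
  | zero =>
      intro i new hi
      have hni : ¬ i < text.length := by omega
      rw [newWordA_go]
      simp [hni, pvH, List.drop_eq_nil_of_le (by omega : text.length ≤ i)]
  | succ d ih =>
      intro i new hi
      have hit : i < text.length := by omega
      have hiw : i < wert.length := by omega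
      rw [newWordA_go]
      simp only [hit, dif_pos, pyGet?_some_of_lt hit, pyGet?_some_of_lt hiw]
      by_cases hc : wert[i] = text[i] ∨ wert[i] = '_'
      · simp only [hc, if_pos]
        rw [ih (i + 1) (new ++ [text[i]]) (by omega)]
        exact pvH_shift_match wert text new (new ++ [text[i]]) i wert[i] text[i]
          (pyGet?_some_of_lt hiw) (pyGet?_some_of_lt hit) hc
          (by simp [List.getElem_cons_drop hit]) d
      · simp only [hc, if_neg, not_false_iff]
        rw [ih (i + 1) [] (by omega)]
        exact pvH_shift_mismatch wert text new i wert[i] text[i]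
          (pyGet?_some_of_lt hiw) (pyGet?_some_of_lt hit) hc d
theorem B_eq_pvH (wert text : List Char) (hlen : text.length ≤ wert.length) :
    ∀ (k : Nat) (new suffix : List Char), k ≤ text.length → suffix = text.drop k →
      newWordB_go wert text new k suffix = pvH wert text new 0 k := by
  intro k
  induction k with
  | zero =>
      intro new suffix _ hs
      simp [newWordB_go, pvH, hs]
  | succ k ih =>
      intro new suffix hk hs
      have hkt : k < text.length := by omega
      have hkw : k < wert.length := by omega
      have hz : (0 + k : Nat) = k := by omega
      simp only [newWordB_go, pvH, hz, pyGet?_some_of_lt hkt, pyGet?_some_of_lt hkw]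
      by_cases hc : wert[k] = text[k] ∨ wert[k] = '_'
      · simp only [hc, if_pos]
        exact ih new (text[k] :: suffix) (by omega) (by rw [hs]; exact List.getElem_cons_drop hkt)
      · simp [hc, hs]

-- ===== VERDICT (by name: the statement is the Claim_ definition above) =====
theorem newWord_spec : Claim_equal_newWord := by
  intro wert text new _ hpre
  unfold Spec_newWord newWord newWord_alt
  congr 1
  rw [A_eq_pvH wert.toList text.toList hpre text.toList.length 0 new.toList (by omega),
      B_eq_pvH wert.toList text.toList hpre text.toList.length new.toList [] (le_refl _)
        (by simp)]
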